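-- pv_equiv track=rewrite | github.com/NayemyMurilloRivera/Algebra | afín.py | convertir_a_valores_numericos
-- ===== SOURCE A (Python) =====
-- alfabeto = "ABCDEFGHIJKLMNOPQRSTUVWXYZ"
--
-- def convertir_a_valores_numericos(texto):
--     valores_numericos = []
--     for caracter in texto:
--         for i in range(len(alfabeto)):
--             if alfabeto[i] == caracter:
--                 valores_numericos.append(i)
--                 break
--     return valores_numericos
-- ===== SOURCE B (Python) =====
-- def convertir_a_valores_numericos(texto):
--     valores_numericos = []
--     for caracter in texto:
--         idx = ord(caracter) - 65
--         if 0 <= idx < 26: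
--             valores_numericos.append(idx)
--     return valores_numericos
-- ===== Notes on version B (the rewrite author's own statement) =====
-- stated objective: faster
-- what changed: Replaces the inner 26-step scan over the alphabet string with direct arithmetic on ord(caracter), keeping the same skip-non-A-Z behaviour and output order.
import Mathlib
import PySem

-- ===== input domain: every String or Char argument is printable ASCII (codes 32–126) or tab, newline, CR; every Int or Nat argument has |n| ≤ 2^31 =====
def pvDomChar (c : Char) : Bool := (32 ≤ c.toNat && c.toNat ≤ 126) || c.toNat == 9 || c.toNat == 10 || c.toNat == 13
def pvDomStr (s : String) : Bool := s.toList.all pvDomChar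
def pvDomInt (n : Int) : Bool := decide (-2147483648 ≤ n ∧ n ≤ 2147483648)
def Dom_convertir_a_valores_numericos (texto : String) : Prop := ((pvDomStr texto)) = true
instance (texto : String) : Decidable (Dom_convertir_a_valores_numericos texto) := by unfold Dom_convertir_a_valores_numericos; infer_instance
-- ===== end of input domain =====

-- B replaces A's inner 26-step scan of the alphabet with direct arithmetic on the character code (constant-factor speedup; return value only, no mutation involved).

-- ===== PORT A =====
-- alfabeto = "ABCDEFGHIJKLMNOPQRSTUVWXYZ"
def pvAlfabeto : List Char := "ABCDEFGHIJKLMNOPQRSTUVWXYZ".toList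

-- inner 'for i in range(len(alfabeto)): if alfabeto[i] == caracter: append(i); break'
-- (alfabeto[i] via pyGet?; i comes from range(len(alfabeto)) so it is always in range and the ' ' default is never used)
def pvInnerA (caracter : Char) : List Int → List Int
  | [] => []
  | i :: rest =>
      if ((PySem.List.pyGet? pvAlfabeto i).getD ' ') == caracter then [i]
      else pvInnerA caracter rest

def convertir_a_valores_numericos (texto : String) : List Int :=
  texto.toList.foldl
    (fun valores_numericos caracter =>
      valores_numericos ++ pvInnerA caracter (PySem.List.pyRange 0 (pvAlfabeto.length : Int) 1))
    []

-- ===== PORT B =====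
def convertir_a_valores_numericos_alt (texto : String) : List Int :=
  texto.toList.foldl
    (fun valores_numericos caracter =>
      let idx : Int := (caracter.toNat : Int) - 65
      if 0 ≤ idx ∧ idx < 26 then valores_numericos ++ [idx] else valores_numericos)
    []

-- ===== PRECONDITION & SPEC =====
def Spec_convertir_a_valores_numericos (texto : String) (out : List Int) : Prop := out = convertir_a_valores_numericos_alt texto
instance (texto : String) (out : List Int) : Decidable (Spec_convertir_a_valores_numericos texto out) := by unfold Spec_convertir_a_valores_numericos; infer_instance

-- ===== CLAIM (what is proved, stated in full; the proofs are below) =====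
def Claim_equal_convertir_a_valores_numericos : Prop := ∀ (texto : String), Dom_convertir_a_valores_numericos texto → Spec_convertir_a_valores_numericos texto (convertir_a_valores_numericos texto)

-- ===== LEMMAS AND PROOFS =====

theorem pv_char_eq_of_toNat (a b : Char) (h : a.toNat = b.toNat) : a = b := by
  apply Char.ext
  exact UInt32.toBitVec_inj.mp (BitVec.toNat_inj.mp h)

theorem pv_alf_getD (a : Nat) (h : a < 26) :
    (pvAlfabeto.getD a ' ').toNat = 65 + a := by
  have hall : ∀ a ∈ List.range 26, (pvAlfabeto.getD a ' ').toNat = 65 + a := by decide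
  exact hall a (List.mem_range.mpr h)

-- the inner scan, started at index a, returns [ord c - 65] iff that value lies in [a, 26), else []
theorem pvInnerA_eq (c : Char) (a : Nat) (ha : a ≤ 26) :
    pvInnerA c (PySem.List.pyRange (a : Int) 26 1) =
      (if (a : Int) ≤ (c.toNat : Int) - 65 ∧ (c.toNat : Int) - 65 < 26
        then [((c.toNat : Int) - 65)] else []) := by
  induction hk : 26 - a generalizing a with
  | zero =>
      have ha26 : a = 26 := by omega
      subst ha26
      rw [PySem.List.pyRange_one_eq_nil (by norm_num)]
      have : ¬ ((26 : Int) ≤ (c.toNat : Int) - 65 ∧ (c.toNat : Int) - 65 < 26) := by omega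
      simp [pvInnerA, this]
  | succ k ih =>
      have halt : a < 26 := by omega
      rw [PySem.List.pyRange_one_cons (by exact_mod_cast halt)]
      have hget : PySem.List.pyGet? pvAlfabeto (a : Int) = some (pvAlfabeto.getD a ' ') := by
        rw [PySem.List.pyGet?_natCast, List.getD_eq_getElem?_getD,
          List.getElem?_eq_getElem (show a < pvAlfabeto.length by simpa [pvAlfabeto] using halt)]
        simp
      by_cases hc : (pvAlfabeto.getD a ' ') = c
      · have hcn : (c.toNat : Int) - 65 = (a : Int) := by
          have := pv_alf_getD a halt
          rw [hc] at this
          omega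
        have hcond : ((a : Int) ≤ (c.toNat : Int) - 65 ∧ (c.toNat : Int) - 65 < 26) := by omega
        simp only [pvInnerA, hget, Option.getD_some, beq_iff_eq, if_pos hc, hcn]
        rw [if_pos (show ((a : Int) ≤ (a : Int) ∧ (a : Int) < 26) by omega)]
      · have hne : (c.toNat : Int) - 65 ≠ (a : Int) := by
          intro h
          apply hc
          apply pv_char_eq_of_toNat
          have := pv_alf_getD a halt
          omega
        have hstep : ((a : Int) + 1) = ((a + 1 : Nat) : Int) := by push_cast; ring
        rw [show pvInnerA c ((a : Int) :: PySem.List.pyRange ((a : Int) + 1) 26 1)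
              = pvInnerA c (PySem.List.pyRange ((a : Int) + 1) 26 1) by
            simp only [pvInnerA, hget, Option.getD_some, beq_iff_eq, if_neg hc]]
        rw [hstep, ih (a + 1) (by omega) (by omega)]
        rw [← hstep]
        split_ifs with h1 h2 h2 <;> first | rfl | (exfalso; omega)

-- ===== VERDICT (by name: the statement is the Claim_ definition above) =====
theorem convertir_a_valores_numericos_spec : Claim_equal_convertir_a_valores_numericos := by
  intro texto _
  unfold Spec_convertir_a_valores_numericos convertir_a_valores_numericos convertir_a_valores_numericos_alt
  induction texto.toList using List.reverseRecOn with
  | nil => rfl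
  | append_singleton xs c ih =>
      simp only [List.foldl_append, List.foldl_cons, List.foldl_nil, ih]
      have h := pvInnerA_eq c 0 (by omega)
      simp only [Int.natCast_zero] at h
      have hlen : ((pvAlfabeto.length : Nat) : Int) = 26 := by simp [pvAlfabeto]
      rw [hlen, h]
      split_ifs <;> simp
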